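-- pv_equiv track=rewrite | github.com/pypi-data/pypi-mirror-403 | packages/ewoksxrpd/ewoksxrpd-1.6.0-py3-none-any.whl/ewoksxrpd/tasks/calibrate.py | _fixed_parameters_sets
-- ===== SOURCE A (Python) =====
-- from typing import List
-- from typing import Optional
-- from typing import Sequence
-- from typing import Set
--
-- def _fixed_parameters_sets(
--     all_params: Set[str],
--     always_fixed_params: Set[str],
--     incremental_release_groups: Sequence[Set[str]],
-- ) -> List[Optional[Set[str]]]:
--     """
--     Returns a sequence of fixed parameter sets based on incremental parameter releases.
--
--     :param all_params: The complete set of parameters.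
--     :param always_fixed_params: Parameters that are always fixed, regardless of release groups.
--     :param incremental_release_groups: A sequence of parameter groups that are released incrementally.
--     :returns: A list where each element is a set of parameters that remain fixed
--               after the corresponding release step.
--     """
--     fixed_parameters = list()
--     accumulate_released_parameters = set()
--     for release_group in incremental_release_groups:
--         accumulate_released_parameters |= release_group - always_fixed_params
--         if not accumulate_released_parameters:
--             continue
--         fixed = all_params - accumulate_released_parameters
--         if not fixed:
--             fixed = None
--         if fixed in fixed_parameters:
--             continue
--         fixed_parameters.append(fixed)
--     return fixed_parameters
-- ===== SOURCE B (Python) =====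
-- from typing import List
-- from typing import Optional
-- from typing import Sequence
-- from typing import Set
--
--
-- def _fixed_parameters_sets(
--     all_params: Set[str],
--     always_fixed_params: Set[str],
--     incremental_release_groups: Sequence[Set[str]],
-- ) -> List[Optional[Set[str]]]:
--     # Phase 1: one fixed-set candidate per release step (skipping steps with
--     # nothing released yet).  Phase 2: because the released set only grows,
--     # the candidates form a non-increasing chain, so duplicates are always
--     # consecutive; collapsing adjacent equals gives the dedup-in-order list.
--     released = set()
--     candidates = []
--     for group in incremental_release_groups:
--         released |= group - always_fixed_params
--         if released:
--             candidates.append((all_params - released) or None)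
--     result = []
--     for fixed in candidates:
--         if result and result[-1] == fixed:
--             continue
--         result.append(fixed)
--     return result
-- ===== Notes on version B (the rewrite author's own statement) =====
-- stated objective: simpler
-- what changed: B splits A's single loop into two phases - build the per-step fixed-set candidates, then collapse adjacent equal ones - replacing A's scan of the whole output list per step with a single comparison against the last emitted set, which is correct because the released set only grows so duplicates are always consecutive.
import Mathlib
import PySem

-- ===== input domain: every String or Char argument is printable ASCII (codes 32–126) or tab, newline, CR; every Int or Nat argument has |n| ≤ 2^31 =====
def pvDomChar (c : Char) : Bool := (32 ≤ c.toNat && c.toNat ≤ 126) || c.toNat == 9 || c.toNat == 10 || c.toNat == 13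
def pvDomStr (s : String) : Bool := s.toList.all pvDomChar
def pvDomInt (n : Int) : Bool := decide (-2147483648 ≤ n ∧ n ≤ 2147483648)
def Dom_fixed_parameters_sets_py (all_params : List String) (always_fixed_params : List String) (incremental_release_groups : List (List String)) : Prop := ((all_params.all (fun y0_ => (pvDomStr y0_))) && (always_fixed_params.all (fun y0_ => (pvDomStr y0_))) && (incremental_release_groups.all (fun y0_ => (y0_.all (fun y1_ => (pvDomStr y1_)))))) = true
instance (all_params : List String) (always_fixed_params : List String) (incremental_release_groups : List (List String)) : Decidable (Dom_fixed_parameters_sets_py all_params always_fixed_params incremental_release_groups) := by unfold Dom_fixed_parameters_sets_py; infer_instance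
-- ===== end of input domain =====

-- B replaces A's full-history membership scan by a two-phase candidates-then-collapse pass
-- that only compares each candidate with the last emitted set (objective: simpler).

-- shared one-liners of both Pythons: '==' on Optional[set], 'released |= group - always_fixed',
-- and 'fixed = all_params - released; if not fixed: fixed = None'
def pvOptSetEq (a b : Option (List String)) : Bool :=
  match a, b with
  | none, none => true
  | some s, some t => PySem.Set.equal s t
  | _, _ => false

def pvStep (always : List String) (acc : PySem.Set String) (g : List String) : PySem.Set String :=
  PySem.Set.union acc (PySem.Set.diff (PySem.Set.ofList g) always)

def pvFixed (allS : PySem.Set String) (acc : PySem.Set String) : Option (List String) :=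
  if PySem.Set.diff allS acc = [] then none else some (PySem.Set.diff allS acc)

-- ===== PORT A =====
def pvLoopA (allS always : List String) : List (List String) → List (Option (List String)) → PySem.Set String → List (Option (List String))
  | [], out, _ => out
  | g :: gs, out, acc =>
    if pvStep always acc g = [] then pvLoopA allS always gs out (pvStep always acc g)
    else if out.any (fun o => pvOptSetEq o (pvFixed allS (pvStep always acc g))) then
      pvLoopA allS always gs out (pvStep always acc g)
    else
      pvLoopA allS always gs (out ++ [pvFixed allS (pvStep always acc g)]) (pvStep always acc g)

def fixed_parameters_sets_py (all_params : List String) (always_fixed_params : List String) (incremental_release_groups : List (List String)) : List (Option (List String)) :=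
  pvLoopA (PySem.Set.ofList all_params) always_fixed_params incremental_release_groups [] PySem.Set.empty

-- ===== PORT B =====
-- phase 1: one fixed-set candidate per step with a non-empty released set
def pvCandidates (allS always : List String) : List (List String) → PySem.Set String → List (Option (List String))
  | [], _ => []
  | g :: gs, rel =>
    if pvStep always rel g = [] then pvCandidates allS always gs (pvStep always rel g)
    else pvFixed allS (pvStep always rel g) :: pvCandidates allS always gs (pvStep always rel g)

-- phase 2: collapse adjacent equal candidates ('if result and result[-1] == fixed: continue')
def pvCollapse : List (Option (List String)) → List (Option (List String)) → List (Option (List String))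
  | [], res => res
  | f :: fs, res =>
    match res.getLast? with
    | some l => if pvOptSetEq l f then pvCollapse fs res else pvCollapse fs (res ++ [f])
    | none => pvCollapse fs (res ++ [f])

def fixed_parameters_sets_py_alt (all_params : List String) (always_fixed_params : List String) (incremental_release_groups : List (List String)) : List (Option (List String)) :=
  pvCollapse (pvCandidates (PySem.Set.ofList all_params) always_fixed_params incremental_release_groups PySem.Set.empty) []

-- ===== PRECONDITION & SPEC =====
def Spec_fixed_parameters_sets_py (all_params : List String) (always_fixed_params : List String) (incremental_release_groups : List (List String)) (out : List (Option (List String))) : Prop := out = fixed_parameters_sets_py_alt all_params always_fixed_params incremental_release_groups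
instance (all_params : List String) (always_fixed_params : List String) (incremental_release_groups : List (List String)) (out : List (Option (List String))) : Decidable (Spec_fixed_parameters_sets_py all_params always_fixed_params incremental_release_groups out) := by unfold Spec_fixed_parameters_sets_py; infer_instance

-- ===== CLAIM (what is proved, stated in full; the proofs are below) =====
def Claim_equal_fixed_parameters_sets_py : Prop := ∀ (all_params : List String) (always_fixed_params : List String) (incremental_release_groups : List (List String)), Dom_fixed_parameters_sets_py all_params always_fixed_params incremental_release_groups → Spec_fixed_parameters_sets_py all_params always_fixed_params incremental_release_groups (fixed_parameters_sets_py all_params always_fixed_params incremental_release_groups)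

-- ===== LEMMAS AND PROOFS =====

-- extensional view of an Optional[set] value
def pvMemO (x : String) : Option (List String) → Prop
  | none => False
  | some s => x ∈ s

def pvSubO (a b : Option (List String)) : Prop := ∀ x, pvMemO x a → pvMemO x b

-- 'proper': the value never is 'some []' (A turns the empty set into None before storing)
def pvProperO : Option (List String) → Prop
  | none => True
  | some s => s ≠ []

theorem pvOptSetEq_iff (a b : Option (List String)) (ha : pvProperO a) (hb : pvProperO b) :
    pvOptSetEq a b = true ↔ ∀ x, pvMemO x a ↔ pvMemO x b := by
  cases a with
  | none =>
    cases b with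
    | none => simp [pvOptSetEq, pvMemO]
    | some t =>
      simp only [pvOptSetEq, pvMemO]
      constructor
      · intro h; cases h
      · intro h
        rcases List.exists_mem_of_ne_nil t hb with ⟨x, hx⟩
        exact absurd hx (by simpa using (h x).mpr)
  | some s =>
    cases b with
    | none =>
      simp only [pvOptSetEq, pvMemO]
      constructor
      · intro h; cases h
      · intro h
        rcases List.exists_mem_of_ne_nil s ha with ⟨x, hx⟩
        exact ((h x).mp hx).elim
    | some t =>
      simp only [pvOptSetEq, pvMemO]
      exact PySem.Set.equal_iff s t

theorem pvMemO_pvFixed (allS acc : List String) (x : String) :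
    pvMemO x (pvFixed allS acc) ↔ x ∈ allS ∧ x ∉ acc := by
  unfold pvFixed
  split_ifs with h
  · simp only [pvMemO]
    rw [← PySem.Set.mem_diff allS acc x, h]
    simp
  · simp only [pvMemO]
    exact PySem.Set.mem_diff allS acc x

theorem pvProperO_pvFixed (allS acc : List String) : pvProperO (pvFixed allS acc) := by
  unfold pvFixed
  split_ifs with h
  · trivial
  · exact h

theorem pvSubO_pvFixed_mono (allS : List String) {acc acc' : List String}
    (h : ∀ x, x ∈ acc → x ∈ acc') : pvSubO (pvFixed allS acc') (pvFixed allS acc) := by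
  intro x hx
  rw [pvMemO_pvFixed] at hx ⊢
  exact ⟨hx.1, fun hmem => hx.2 (h x hmem)⟩

theorem pvMem_pvStep (always : List String) (acc : PySem.Set String) (g : List String) :
    ∀ x, x ∈ acc → x ∈ pvStep always acc g := by
  intro x hx
  unfold pvStep
  rw [PySem.Set.mem_union]
  exact Or.inl hx

-- the loop invariant of A: the emitted sets strictly decrease, and the current fixed set
-- is contained in every emitted one
def pvInv (allS : List String) (acc : PySem.Set String) (out : List (Option (List String))) : Prop :=
  out.Pairwise (fun a b => pvSubO b a ∧ ¬ pvSubO a b)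
  ∧ ∀ o ∈ out, pvProperO o ∧ pvSubO (pvFixed allS acc) o

theorem pvInv_mono (allS : List String) {acc acc' : PySem.Set String}
    (out : List (Option (List String))) (h : ∀ x, x ∈ acc → x ∈ acc') :
    pvInv allS acc out → pvInv allS acc' out := by
  rintro ⟨hp, hm⟩
  refine ⟨hp, fun o ho => ⟨(hm o ho).1, fun x hx => (hm o ho).2 x (pvSubO_pvFixed_mono allS h x hx)⟩⟩

-- A's full-history membership test equals B's last-element test, under the invariant
theorem pvAny_eq_last (f : Option (List String)) (out : List (Option (List String)))
    (hf : pvProperO f)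
    (hpair : out.Pairwise (fun a b => pvSubO b a ∧ ¬ pvSubO a b))
    (hmem : ∀ o ∈ out, pvProperO o ∧ pvSubO f o) :
    out.any (fun o => pvOptSetEq o f)
      = (match out.getLast? with | some l => pvOptSetEq l f | none => false) := by
  rcases List.eq_nil_or_concat out with rfl | ⟨init, last, rfl⟩
  · simp
  · simp only [List.concat_eq_append] at hpair hmem ⊢
    rw [List.getLast?_concat]
    simp only [List.any_append, List.any_cons, List.any_nil, Bool.or_false]
    have hinit : init.any (fun o => pvOptSetEq o f) = false := by
      rw [List.any_eq_false]
      intro o ho heq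
      have hrel : pvSubO last o ∧ ¬ pvSubO o last := by
        have := (List.pairwise_append.mp hpair).2.2
        exact this o ho last (by simp)
      have hext := (pvOptSetEq_iff o f (hmem o (by simp [ho])).1 hf).mp heq
      have hflast : pvSubO f last := (hmem last (by simp)).2
      exact hrel.2 (fun x hx => hflast x ((hext x).mp hx))
    rw [hinit]
    simp

-- invariant preserved when A appends (the append branch knows the test was false)
theorem pvInv_append (allS : List String) {acc acc' : PySem.Set String}
    (out : List (Option (List String)))
    (hacc : ∀ x, x ∈ acc → x ∈ acc')
    (hInv : pvInv allS acc out)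
    (hall : ∀ o ∈ out, ¬ pvOptSetEq o (pvFixed allS acc') = true) :
    pvInv allS acc' (out ++ [pvFixed allS acc']) := by
  rcases hInv with ⟨hp, hm⟩
  have hsubf : ∀ o ∈ out, pvSubO (pvFixed allS acc') o := fun o ho x hx =>
    (hm o ho).2 x (pvSubO_pvFixed_mono allS hacc x hx)
  constructor
  · rw [List.pairwise_append]
    refine ⟨hp, by simp, ?_⟩
    intro o ho b hb
    simp only [List.mem_singleton] at hb
    subst hb
    refine ⟨hsubf o ho, ?_⟩
    intro hsub
    apply hall o ho
    rw [pvOptSetEq_iff o _ (hm o ho).1 (pvProperO_pvFixed allS acc')]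
    exact fun x => ⟨fun hx => hsub x hx, fun hx => hsubf o ho x hx⟩
  · intro o ho
    rcases List.mem_append.mp ho with ho' | ho'
    · exact ⟨(hm o ho').1, hsubf o ho'⟩
    · simp only [List.mem_singleton] at ho'
      subst ho'
      exact ⟨pvProperO_pvFixed allS acc', fun x hx => hx⟩

-- the main lemma: A's single fold equals B's candidates-then-collapse, from any invariant state
theorem pvMain (allS always : List String) (groups : List (List String)) :
    ∀ (acc : PySem.Set String) (out : List (Option (List String))), pvInv allS acc out →
      pvLoopA allS always groups out acc = pvCollapse (pvCandidates allS always groups acc) out := by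
  induction groups with
  | nil => intro acc out _; simp [pvLoopA, pvCandidates, pvCollapse]
  | cons g gs ih =>
    intro acc out hInv
    by_cases h : pvStep always acc g = []
    · simp only [pvLoopA, pvCandidates, h, if_true]
      have hInv0 := pvInv_mono allS out (pvMem_pvStep always acc g) hInv
      rw [h] at hInv0
      exact ih _ out hInv0
    · have hInv' := pvInv_mono allS out (pvMem_pvStep always acc g) hInv
      have hkey := pvAny_eq_last (pvFixed allS (pvStep always acc g)) out
        (pvProperO_pvFixed allS _) hInv'.1 (fun o ho => ⟨(hInv'.2 o ho).1, (hInv'.2 o ho).2⟩)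
      simp only [pvLoopA, pvCandidates, h, if_false]
      rcases hl : out.getLast? with _ | l
      · have hout : out = [] := List.getLast?_eq_none_iff.mp hl
        subst hout
        simp only [pvCollapse, List.any_nil, Bool.false_eq_true, if_false, List.nil_append]
        refine ih _ _ ?_
        have := pvInv_append allS (acc' := pvStep always acc g) [] (pvMem_pvStep always acc g) hInv (by simp)
        simpa using this
      · have hkey' : (out.any fun o => pvOptSetEq o (pvFixed allS (pvStep always acc g)))
            = pvOptSetEq l (pvFixed allS (pvStep always acc g)) := by rw [hkey, hl]
        simp only [pvCollapse, hl]
        rw [hkey']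
        split_ifs with heq
        · exact ih _ out hInv'
        · refine ih _ _ ?_
          refine pvInv_append allS out (pvMem_pvStep always acc g) hInv ?_
          intro o ho hc
          have hfalse : (out.any fun o => pvOptSetEq o (pvFixed allS (pvStep always acc g))) = false := by
            rw [hkey']
            exact Bool.eq_false_iff.mpr heq
          have := List.any_eq_false.mp hfalse o ho
          simp [hc] at this

-- ===== VERDICT (by name: the statement is the Claim_ definition above) =====
theorem fixed_parameters_sets_py_spec : Claim_equal_fixed_parameters_sets_py := by
  intro all_params always_fixed_params groups _
  unfold Spec_fixed_parameters_sets_py fixed_parameters_sets_py fixed_parameters_sets_py_alt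
  exact pvMain (PySem.Set.ofList all_params) always_fixed_params groups PySem.Set.empty []
    ⟨List.Pairwise.nil, by simp⟩
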